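-- pv_equiv track=rewrite | github.com/pbielak/aoc2020 | day21/main.py | get_allergen_to_ingredient_mapping
-- ===== SOURCE A (Python) =====
-- from collections import defaultdict
-- from typing import Dict, List, Set, Tuple
--
-- Food = Tuple[List[str], List[str]]
--
-- def get_allergen_to_ingredient_mapping(
--     food: List[Food]
-- ) -> Dict[str, str]:
--     # Each ingredient -> 0/1 allergen
--     # Each allergen -> 1 ingredient
--     alg2posing = defaultdict(set)  # Allergen to possible ingredients
--
--     for ingredients, allergens in food:
--         for a in allergens:
--
--             if a not in alg2posing.keys():
--                 alg2posing[a] = set(ingredients)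
--             else:
--                 alg2posing[a] = (
--                     alg2posing[a]
--                     .intersection(set(ingredients))
--                 )
--
--     mapping = {}
--     while alg2posing:
--         for allergen, possible_ingredients in alg2posing.items():
--             if len(possible_ingredients) == 1:
--                 assert allergen not in mapping.keys()
--                 mapping[allergen] = list(possible_ingredients)[0]
--
--         alg2posing = {
--             allergen: [
--                 pi
--                 for pi in possible_ingredients
--                 if pi not in mapping.values()
--             ]
--             for allergen, possible_ingredients in alg2posing.items()
--             if allergen not in mapping.keys()
--         }
--
--     return mapping
-- ===== SOURCE B (Python) =====
-- def get_allergen_to_ingredient_mapping(food):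
--     # Worklist constraint propagation with a reverse (ingredient -> allergens)
--     # index: resolve whole waves of singleton sets, removing each assigned
--     # ingredient only from the sets that actually contain it.
--     cand = {}
--     for ingredients, allergens in food:
--         ing = set(ingredients)
--         for a in allergens:
--             cand[a] = cand[a] & ing if a in cand else set(ing)
--     occ = {a: k for k, a in enumerate(cand)}
--     rev = {}
--     for a, s in cand.items():
--         for i in s:
--             rev.setdefault(i, set()).add(a)
--     mapping = {}
--     wave = [a for a, s in cand.items() if len(s) == 1]
--     while wave:
--         for a in wave:
--             mapping[a] = next(iter(cand[a]))
--         touched = set()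
--         for a in wave:
--             for b in rev[mapping[a]]:
--                 if b not in mapping:
--                     cand[b].discard(mapping[a])
--                     touched.add(b)
--         wave = sorted((b for b in touched if len(cand[b]) == 1), key=occ.get)
--     return mapping
-- ===== Notes on version B (the rewrite author's own statement) =====
-- stated objective: alternative
-- what changed: A rebuilds the whole allergen->candidates dict every round and tests every ingredient against mapping.values() by a linear scan; B does worklist constraint propagation: a reverse ingredient->allergens index is built once, each resolved wave removes its assigned ingredients only from the candidate sets that actually contain them, and newly-singleton allergens form the next wave (sorted back into first-occurrence order).
import Mathlib
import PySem

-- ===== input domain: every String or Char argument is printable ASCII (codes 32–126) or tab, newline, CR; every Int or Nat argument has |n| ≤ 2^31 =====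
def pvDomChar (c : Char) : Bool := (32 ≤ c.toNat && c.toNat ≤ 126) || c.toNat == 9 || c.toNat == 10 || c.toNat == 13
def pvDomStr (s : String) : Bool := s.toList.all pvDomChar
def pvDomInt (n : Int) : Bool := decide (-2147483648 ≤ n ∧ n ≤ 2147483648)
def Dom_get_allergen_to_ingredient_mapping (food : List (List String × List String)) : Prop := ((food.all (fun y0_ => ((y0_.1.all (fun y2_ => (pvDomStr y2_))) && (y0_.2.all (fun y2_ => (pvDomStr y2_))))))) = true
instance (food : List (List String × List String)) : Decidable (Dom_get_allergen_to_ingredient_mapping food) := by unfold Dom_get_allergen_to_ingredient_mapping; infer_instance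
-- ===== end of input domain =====

-- B replaces A's per-round rebuild-and-rescan elimination by worklist constraint
-- propagation with a reverse ingredient→allergens index (objective: alternative).
-- A's Python `while` loop DIVERGES on inputs whose constraints cannot be fully
-- eliminated; its port below carries a fuel counter. Stuck states are fixpoints,
-- so the fueled port returns the same partial mapping python B returns there,
-- and the proved equality of the two ports is unconditional.

-- ===== PORT A =====
-- allergen -> possible ingredients (intersection of the ingredient sets of its foods)
def pvAbuild (food : List (List String × List String)) : PySem.Dict String (List String) :=
  food.foldl (fun p f =>
    f.2.foldl (fun p a =>
      if p.contains a then p.insert a (PySem.Set.inter (p.getD a []) (PySem.Set.ofList f.1))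
      else p.insert a (PySem.Set.ofList f.1)) p) PySem.Dict.empty

-- the `while alg2posing:` loop; one fuel unit per iteration (see header note)
def pvAloop : Nat → PySem.Dict String (List String) → PySem.Dict String String → PySem.Dict String String
  | 0, _, m => m
  | fuel+1, p, m =>
    if p.items = [] then m
    else
      let m' := p.items.foldl (fun mm q => if q.2.length == 1 then mm.insert q.1 (q.2.headD "") else mm) m
      let p' := PySem.Dict.mk (p.items.filterMap (fun q =>
          if m'.contains q.1 then none
          else some (q.1, q.2.filter (fun pi => !(m'.values.contains pi)))))
      pvAloop fuel p' m'

def get_allergen_to_ingredient_mapping (food : List (List String × List String)) : List (String × String) :=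
  let p := pvAbuild food
  (pvAloop (p.size + 1) p PySem.Dict.empty).items

-- ===== PORT B =====
def pvBbuild (food : List (List String × List String)) : PySem.Dict String (List String) :=
  food.foldl (fun c f =>
    let ing := PySem.Set.ofList f.1
    f.2.foldl (fun c a =>
      c.insert a (if c.contains a then PySem.Set.inter (c.getD a []) ing else ing)) c) PySem.Dict.empty

-- occ = {a: k for k, a in enumerate(cand)}
def pvBocc (keys : List String) : PySem.Dict String Int :=
  (PySem.List.enumerate keys 0).foldl (fun d q => d.insert q.2 q.1) PySem.Dict.empty

-- rev = ingredient -> set of allergens whose candidate set contains it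
def pvBrev (items : List (String × List String)) : PySem.Dict String (List String) :=
  items.foldl (fun r q => q.2.foldl (fun r i => r.modify i [] (fun s => PySem.Set.add s q.1)) r) PySem.Dict.empty

-- the `while wave:` loop (python B always terminates; cand.size+1 iterations suffice)
def pvBloop (rev : PySem.Dict String (List String)) (occ : PySem.Dict String Int) :
    Nat → PySem.Dict String (List String) → PySem.Dict String String → List String → PySem.Dict String String
  | 0, _, m, _ => m
  | fuel+1, cand, m, wave =>
    if wave = [] then m
    else
      let m' := wave.foldl (fun mm a => mm.insert a ((cand.getD a []).headD "")) m
      let ct := wave.foldl (fun (ct : PySem.Dict String (List String) × List String) a =>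
          (rev.getD (m'.getD a "") []).foldl (fun ct b =>
            if m'.contains b then ct
            else (ct.1.insert b (PySem.Set.discard (ct.1.getD b []) (m'.getD a "")), PySem.Set.add ct.2 b)) ct)
          (cand, ([] : List String))
      pvBloop rev occ fuel ct.1 m'
        (PySem.List.sorted (ct.2.filter (fun b => (ct.1.getD b []).length == 1)) (fun b => occ.getD b 0) false)

def get_allergen_to_ingredient_mapping_alt (food : List (List String × List String)) : List (String × String) :=
  let cand := pvBbuild food
  let occ := pvBocc (cand.items.map (·.1))
  let rev := pvBrev cand.items
  (pvBloop rev occ (cand.size + 1) cand PySem.Dict.empty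
    ((cand.items.filter (fun q => q.2.length == 1)).map (·.1))).items

-- ===== PRECONDITION & SPEC =====
def Spec_get_allergen_to_ingredient_mapping (food : List (List String × List String)) (out : List (String × String)) : Prop := out = get_allergen_to_ingredient_mapping_alt food
instance (food : List (List String × List String)) (out : List (String × String)) : Decidable (Spec_get_allergen_to_ingredient_mapping food out) := by unfold Spec_get_allergen_to_ingredient_mapping; infer_instance

-- ===== CLAIM (what is proved, stated in full; the proofs are below) =====
def Claim_equal_get_allergen_to_ingredient_mapping : Prop := ∀ (food : List (List String × List String)), Dom_get_allergen_to_ingredient_mapping food → Spec_get_allergen_to_ingredient_mapping food (get_allergen_to_ingredient_mapping food)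

-- ===== LEMMAS AND PROOFS =====


-- generic helpers for the loop shapes of the two ports

theorem pv_foldl_guard_false {α β : Type} (l : List α) (p : α → Bool) (f : β → α → β) (init : β)
    (h : ∀ x ∈ l, p x = false) :
    l.foldl (fun acc x => if p x then f acc x else acc) init = init := by
  induction l generalizing init with
  | nil => rfl
  | cons x t ih =>
    simp only [List.foldl, h x (List.mem_cons_self), Bool.false_eq_true, if_false]
    exact ih init (fun y hy => h y (List.mem_cons_of_mem _ hy))

theorem pv_filterMap_ite {α β : Type} (l : List α) (p : α → Bool) (h : α → β) :
    l.filterMap (fun a => if p a then none else some (h a))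
      = (l.filter (fun a => !p a)).map h := by
  induction l with
  | nil => rfl
  | cons x t ih =>
    by_cases hx : p x = true
    · simp [hx, ih]
    · simp only [Bool.not_eq_true] at hx
      simp [hx, ih]

theorem pv_items_waveFold (wave : List String) (f : String → String) (m : PySem.Dict String String)
    (hfresh : ∀ a ∈ wave, m.contains a = false) (hnd : wave.Nodup) :
    (wave.foldl (fun mm a => mm.insert a (f a)) m).items
      = m.items ++ wave.map (fun a => (a, f a)) := by
  have := PySem.Dict.items_foldl_insert_fresh (l := wave) (k := fun a => a) (v := f) (d := m)
    hfresh (by simpa using hnd)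
  simpa using this

theorem pv_build_inner_eq (ing : List String) (algs : List String)
    (d : PySem.Dict String (List String)) :
    algs.foldl (fun p a =>
        if p.contains a then p.insert a (PySem.Set.inter (p.getD a []) (PySem.Set.ofList ing))
        else p.insert a (PySem.Set.ofList ing)) d
      = algs.foldl (fun c a =>
          c.insert a (if c.contains a then PySem.Set.inter (c.getD a []) (PySem.Set.ofList ing)
                      else PySem.Set.ofList ing)) d := by
  induction algs generalizing d with
  | nil => rfl
  | cons a t ih =>
    simp only [List.foldl]
    rw [apply_ite (fun v => d.insert a v)]
    exact ih _

theorem pv_build_eq (food : List (List String × List String)) : pvAbuild food = pvBbuild food := by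
  unfold pvAbuild pvBbuild
  suffices h : ∀ d : PySem.Dict String (List String),
      food.foldl (fun p f =>
        f.2.foldl (fun p a =>
          if p.contains a then p.insert a (PySem.Set.inter (p.getD a []) (PySem.Set.ofList f.1))
          else p.insert a (PySem.Set.ofList f.1)) p) d
      = food.foldl (fun c f =>
          f.2.foldl (fun c a =>
            c.insert a (if c.contains a then PySem.Set.inter (c.getD a []) (PySem.Set.ofList f.1)
                        else PySem.Set.ofList f.1)) c) d by
    exact h _
  induction food with
  | nil => intro d; rfl
  | cons fd rest ih =>
    intro d
    simp only [List.foldl]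
    rw [pv_build_inner_eq]
    exact ih _

theorem pv_build_inner_keys_nodup (ing : List String) (algs : List String)
    (d : PySem.Dict String (List String)) (hd : d.keys.Nodup) :
    (algs.foldl (fun c a =>
        c.insert a (if c.contains a then PySem.Set.inter (c.getD a []) (PySem.Set.ofList ing)
                    else PySem.Set.ofList ing)) d).keys.Nodup :=
  PySem.Dict.nodup_keys_foldl_insert algs
    (fun c a => if c.contains a then PySem.Set.inter (c.getD a []) (PySem.Set.ofList ing)
                else PySem.Set.ofList ing) d hd

theorem pv_build_keys_nodup (food : List (List String × List String)) : (pvBbuild food).keys.Nodup := by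
  unfold pvBbuild
  suffices h : ∀ d : PySem.Dict String (List String), d.keys.Nodup →
      (food.foldl (fun c f =>
          f.2.foldl (fun c a =>
            c.insert a (if c.contains a then PySem.Set.inter (c.getD a []) (PySem.Set.ofList f.1)
                        else PySem.Set.ofList f.1)) c) d).keys.Nodup by
    exact h _ (by simp [PySem.Dict.keys_empty])
  induction food with
  | nil => intro d hd; exact hd
  | cons fd rest ih =>
    intro d hd
    simp only [List.foldl]
    exact ih _ (pv_build_inner_keys_nodup _ _ _ hd)

-- facts about the assignment fold  m' := wave.foldl (fun mm a => mm.insert a (f a)) m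

theorem pv_keys_waveFold (wave : List String) (f : String → String) (m : PySem.Dict String String)
    (hfresh : ∀ a ∈ wave, m.contains a = false) (hnd : wave.Nodup) :
    (wave.foldl (fun mm a => mm.insert a (f a)) m).keys = m.keys ++ wave := by
  show ((wave.foldl (fun mm a => mm.insert a (f a)) m).items.map (·.1)) = _
  rw [pv_items_waveFold wave f m hfresh hnd]
  simp [PySem.Dict.keys, Function.comp_def]

theorem pv_values_waveFold (wave : List String) (f : String → String) (m : PySem.Dict String String)
    (hfresh : ∀ a ∈ wave, m.contains a = false) (hnd : wave.Nodup) :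
    (wave.foldl (fun mm a => mm.insert a (f a)) m).values = m.values ++ wave.map f := by
  show ((wave.foldl (fun mm a => mm.insert a (f a)) m).items.map (·.2)) = _
  rw [pv_items_waveFold wave f m hfresh hnd]
  simp [PySem.Dict.values, Function.comp_def]

theorem pv_keys_nodup_waveFold (wave : List String) (f : String → String) (m : PySem.Dict String String)
    (hfresh : ∀ a ∈ wave, m.contains a = false) (hnd : wave.Nodup) (hm : m.keys.Nodup) :
    (wave.foldl (fun mm a => mm.insert a (f a)) m).keys.Nodup := by
  rw [pv_keys_waveFold wave f m hfresh hnd]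
  refine List.Nodup.append hm hnd (fun x hx hx' => ?_)
  have := PySem.Dict.contains_iff_mem_keys (d := m) (k := x)
  rw [hfresh x hx'] at this
  exact absurd (this.mpr hx) (by simp)

theorem pv_contains_waveFold (wave : List String) (f : String → String) (m : PySem.Dict String String)
    (hfresh : ∀ a ∈ wave, m.contains a = false) (hnd : wave.Nodup) (x : String) :
    (wave.foldl (fun mm a => mm.insert a (f a)) m).contains x = (m.contains x || wave.contains x) := by
  rw [PySem.Dict.contains_eq_decide_mem_keys, pv_keys_waveFold wave f m hfresh hnd,
    PySem.Dict.contains_eq_decide_mem_keys (d := m)]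
  simp [List.mem_append, Bool.decide_or]

theorem pv_getD_waveFold_mem (wave : List String) (f : String → String)
    (m : PySem.Dict String String) (x : String)
    (hfresh : ∀ a ∈ wave, m.contains a = false) (hnd : wave.Nodup) (hm : m.keys.Nodup)
    (hx : x ∈ wave) :
    (wave.foldl (fun mm a => mm.insert a (f a)) m).getD x "" = f x := by
  have hmem : (x, f x) ∈ (wave.foldl (fun mm a => mm.insert a (f a)) m).items := by
    rw [pv_items_waveFold wave f m hfresh hnd]
    exact List.mem_append_right _ (List.mem_map_of_mem hx)
  exact PySem.Dict.getD_of_mem_items _ hmem (pv_keys_nodup_waveFold wave f m hfresh hnd hm) _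

-- characterization of the reverse index rev = pvBrev items

theorem pv_rev_inner_mem (s : List String) (a : String) (r : PySem.Dict String (List String))
    (v x : String) :
    (x ∈ ((s.foldl (fun r i => r.modify i [] (fun t => PySem.Set.add t a)) r).getD v []))
      ↔ x ∈ r.getD v [] ∨ (v ∈ s ∧ x = a) := by
  induction s generalizing r with
  | nil => simp
  | cons i t ih =>
    simp only [List.foldl]
    rw [ih]
    rw [PySem.Dict.getD_modify]
    by_cases hvi : v = i
    · subst hvi
      simp [PySem.Set.mem_add]
      tauto
    · simp only [if_neg hvi]
      simp only [List.mem_cons]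
      constructor
      · rintro (h | ⟨hv, hx⟩)
        · exact Or.inl h
        · exact Or.inr ⟨Or.inr hv, hx⟩
      · rintro (h | ⟨hv | hv, hx⟩)
        · exact Or.inl h
        · exact absurd hv hvi
        · exact Or.inr ⟨hv, hx⟩

theorem pv_rev_mem (items : List (String × List String)) (r : PySem.Dict String (List String))
    (v x : String) :
    (x ∈ ((items.foldl (fun r q => q.2.foldl (fun r i => r.modify i [] (fun t => PySem.Set.add t q.1)) r) r).getD v []))
      ↔ x ∈ r.getD v [] ∨ ∃ q ∈ items, x = q.1 ∧ v ∈ q.2 := by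
  induction items generalizing r with
  | nil => simp
  | cons q t ih =>
    simp only [List.foldl]
    rw [ih, pv_rev_inner_mem]
    constructor
    · rintro (( h | ⟨hv, hx⟩) | h)
      · exact Or.inl h
      · exact Or.inr ⟨q, List.mem_cons_self, hx, hv⟩
      · obtain ⟨q', hq', hx, hv⟩ := h
        exact Or.inr ⟨q', List.mem_cons_of_mem _ hq', hx, hv⟩
    · rintro (h | ⟨q', hq', hx, hv⟩)
      · exact Or.inl (Or.inl h)
      · rcases List.mem_cons.mp hq' with h | h
        · subst h; exact Or.inl (Or.inr ⟨hv, hx⟩)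
        · exact Or.inr ⟨q', h, hx, hv⟩

theorem pv_rev_inner_nodup (s : List String) (a : String) (r : PySem.Dict String (List String))
    (hr : ∀ v, (r.getD v []).Nodup) (v : String) :
    ((s.foldl (fun r i => r.modify i [] (fun t => PySem.Set.add t a)) r).getD v []).Nodup := by
  induction s generalizing r with
  | nil => exact hr v
  | cons i t ih =>
    simp only [List.foldl]
    refine ih _ (fun w => ?_)
    rw [PySem.Dict.getD_modify]
    split
    · exact PySem.Set.nodup_add _ _ (hr i)
    · exact hr w

theorem pv_rev_nodup (items : List (String × List String)) (r : PySem.Dict String (List String))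
    (hr : ∀ v, (r.getD v []).Nodup) (v : String) :
    ((items.foldl (fun r q => q.2.foldl (fun r i => r.modify i [] (fun t => PySem.Set.add t q.1)) r) r).getD v []).Nodup := by
  induction items generalizing r with
  | nil => exact hr v
  | cons q t ih =>
    simp only [List.foldl]
    exact ih _ (fun w => pv_rev_inner_nodup _ _ _ hr w)

-- facts about occ = pvBocc keys

theorem pv_occFold_getD_not_mem (l : List String) (s : Int) (d : PySem.Dict String Int)
    (y : String) (hy : y ∉ l) :
    ((PySem.List.enumerate l s).foldl (fun d q => d.insert q.2 q.1) d).getD y 0 = d.getD y 0 := by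
  induction l generalizing s d with
  | nil => rfl
  | cons x t ih =>
    rw [PySem.List.enumerate_cons]
    simp only [List.foldl]
    rw [ih _ _ (fun h => hy (List.mem_cons_of_mem _ h))]
    rw [PySem.Dict.getD_insert, if_neg (fun h => hy (by rw [h]; exact List.mem_cons_self))]

theorem pv_occ_getD (l : List String) (hnd : l.Nodup) (s : Int) (d : PySem.Dict String Int)
    (i : Nat) (hi : i < l.length) :
    ((PySem.List.enumerate l s).foldl (fun d q => d.insert q.2 q.1) d).getD l[i] 0 = s + i := by
  induction l generalizing s d i with
  | nil => simp at hi
  | cons x t ih =>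
    rw [PySem.List.enumerate_cons]
    simp only [List.foldl]
    cases i with
    | zero =>
      have hx : x ∉ t := (List.nodup_cons.mp hnd).1
      simp only [List.getElem_cons_zero]
      rw [pv_occFold_getD_not_mem _ _ _ _ hx]
      rw [PySem.Dict.getD_insert, if_pos rfl]
      simp
    | succ j =>
      simp only [List.getElem_cons_succ]
      rw [ih (List.nodup_cons.mp hnd).2 (s + 1) _ j (by simpa using hi)]
      push_cast
      ring

theorem pv_occ_pairwise (l : List String) (hnd : l.Nodup) :
    l.Pairwise (fun a b => (pvBocc l).getD a 0 < (pvBocc l).getD b 0) := by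
  refine List.pairwise_iff_getElem.mpr (fun i j hi hj hij => ?_)
  unfold pvBocc
  rw [pv_occ_getD l hnd 0 _ i hi, pv_occ_getD l hnd 0 _ j hj]
  omega

-- characterization of one wave of B's propagation fold (ct = (cand, touched))

theorem pv_ct_inner_getD (m₁ : PySem.Dict String String) (v : String) (L : List String)
    (hL : L.Nodup) (c : PySem.Dict String (List String)) (t : List String) (b : String) :
    (L.foldl (fun ct b => if m₁.contains b then ct
        else (ct.1.insert b (PySem.Set.discard (ct.1.getD b []) v), PySem.Set.add ct.2 b)) (c, t)).1.getD b []
      = if b ∈ L ∧ m₁.contains b = false then PySem.Set.discard (c.getD b []) v else c.getD b [] := by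
  induction L generalizing c t with
  | nil => simp
  | cons b0 L' ih =>
    have hnd' := (List.nodup_cons.mp hL).2
    have hb0 : b0 ∉ L' := (List.nodup_cons.mp hL).1
    simp only [List.foldl]
    by_cases hm : m₁.contains b0 = true
    · rw [if_pos hm, ih hnd' c t]
      by_cases hbb : b = b0
      · subst hbb
        rw [if_neg (by simp [hm]), if_neg (by simp [hm])]
      · by_cases hbL : b ∈ L' ∧ m₁.contains b = false
        · rw [if_pos hbL, if_pos ⟨List.mem_cons_of_mem _ hbL.1, hbL.2⟩]
        · rw [if_neg hbL, if_neg (by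
            rintro ⟨hmem, hf⟩
            rcases List.mem_cons.mp hmem with h | h
            · exact hbb h
            · exact hbL ⟨h, hf⟩)]
    · have hm' : m₁.contains b0 = false := by simpa using hm
      rw [if_neg (by simp [hm'])]
      rw [ih hnd' _ _]
      by_cases hbb : b = b0
      · subst hbb
        rw [if_neg (fun h => hb0 h.1)]
        rw [PySem.Dict.getD_insert, if_pos rfl]
        rw [if_pos ⟨List.mem_cons_self, hm'⟩]
      · rw [PySem.Dict.getD_insert, if_neg hbb]
        by_cases hbL : b ∈ L' ∧ m₁.contains b = false
        · rw [if_pos hbL, if_pos ⟨List.mem_cons_of_mem _ hbL.1, hbL.2⟩]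
        · rw [if_neg hbL, if_neg (by
            rintro ⟨hmem, hf⟩
            rcases List.mem_cons.mp hmem with h | h
            · exact hbb h
            · exact hbL ⟨h, hf⟩)]

theorem pv_ct_inner_keys (m₁ : PySem.Dict String String) (v : String) (L : List String)
    (c : PySem.Dict String (List String)) (t : List String) (hsub : ∀ b ∈ L, b ∈ c.keys) :
    (L.foldl (fun ct b => if m₁.contains b then ct
        else (ct.1.insert b (PySem.Set.discard (ct.1.getD b []) v), PySem.Set.add ct.2 b)) (c, t)).1.keys
      = c.keys := by
  induction L generalizing c t with
  | nil => rfl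
  | cons b0 L' ih =>
    simp only [List.foldl]
    by_cases hm : m₁.contains b0 = true
    · rw [if_pos hm, ih c t (fun b hb => hsub b (List.mem_cons_of_mem _ hb))]
    · rw [if_neg hm]
      have hk : (c.insert b0 (PySem.Set.discard (c.getD b0 []) v)).keys = c.keys := by
        exact PySem.Dict.keys_insert_of_contains _ _
          ((PySem.Dict.contains_iff_mem_keys _ _).mpr (hsub b0 List.mem_cons_self))
      rw [ih _ _ (fun b hb => by rw [hk]; exact hsub b (List.mem_cons_of_mem _ hb))]
      exact hk

theorem pv_ct_inner_touched (m₁ : PySem.Dict String String) (v : String) (L : List String)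
    (c : PySem.Dict String (List String)) (t : List String) (b : String) :
    (b ∈ (L.foldl (fun ct b => if m₁.contains b then ct
        else (ct.1.insert b (PySem.Set.discard (ct.1.getD b []) v), PySem.Set.add ct.2 b)) (c, t)).2)
      ↔ b ∈ t ∨ (b ∈ L ∧ m₁.contains b = false) := by
  induction L generalizing c t with
  | nil => simp
  | cons b0 L' ih =>
    simp only [List.foldl]
    by_cases hm : m₁.contains b0 = true
    · rw [if_pos hm, ih c t]
      constructor
      · rintro (h | ⟨hb, hf⟩)
        · exact Or.inl h
        · exact Or.inr ⟨List.mem_cons_of_mem _ hb, hf⟩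
      · rintro (h | ⟨hb, hf⟩)
        · exact Or.inl h
        · rcases List.mem_cons.mp hb with h' | h'
          · subst h'; rw [hm] at hf; cases hf
          · exact Or.inr ⟨h', hf⟩
    · have hm' : m₁.contains b0 = false := by simpa using hm
      rw [if_neg hm, ih _ _]
      rw [PySem.Set.mem_add]
      constructor
      · rintro ((h | h) | ⟨hb, hf⟩)
        · exact Or.inl h
        · subst h; exact Or.inr ⟨List.mem_cons_self, hm'⟩
        · exact Or.inr ⟨List.mem_cons_of_mem _ hb, hf⟩
      · rintro (h | ⟨hb, hf⟩)
        · exact Or.inl (Or.inl h)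
        · rcases List.mem_cons.mp hb with h' | h'
          · subst h'; exact Or.inl (Or.inr rfl)
          · exact Or.inr ⟨h', hf⟩

theorem pv_ct_inner_tnodup (m₁ : PySem.Dict String String) (v : String) (L : List String)
    (c : PySem.Dict String (List String)) (t : List String) (ht : t.Nodup) :
    (L.foldl (fun ct b => if m₁.contains b then ct
        else (ct.1.insert b (PySem.Set.discard (ct.1.getD b []) v), PySem.Set.add ct.2 b)) (c, t)).2.Nodup := by
  induction L generalizing c t with
  | nil => exact ht
  | cons b0 L' ih =>
    simp only [List.foldl]
    by_cases hm : m₁.contains b0 = true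
    · rw [if_pos hm]; exact ih c t ht
    · rw [if_neg hm]; exact ih _ _ (PySem.Set.nodup_add _ _ ht)

theorem pv_contains_false_of_not_mem_keys {ν : Type} (d : PySem.Dict String ν) (k : String)
    (h : k ∉ d.keys) : d.contains k = false := by
  cases hc : d.contains k
  · rfl
  · exact absurd ((PySem.Dict.contains_iff_mem_keys _ _).mp hc) h

theorem pv_ct_outer (C rev : PySem.Dict String (List String)) (m₁ : PySem.Dict String String)
    (Hrev : ∀ v x, x ∈ rev.getD v [] ↔ x ∈ C.keys ∧ v ∈ C.getD x [])
    (HrevN : ∀ v, (rev.getD v []).Nodup) (W : List String) :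
    ∀ (c : PySem.Dict String (List String)) (t : List String),
    c.keys = C.keys → (∀ b, m₁.contains b = false → ∀ x ∈ c.getD b [], x ∈ C.getD b []) →
    ((W.foldl (fun ct a => (rev.getD (m₁.getD a "") []).foldl (fun ct b => if m₁.contains b then ct
        else (ct.1.insert b (PySem.Set.discard (ct.1.getD b []) (m₁.getD a "")), PySem.Set.add ct.2 b)) ct) (c, t)).1.keys = C.keys
    ∧ (∀ b, m₁.contains b = false → ∀ x ∈ (W.foldl (fun ct a => (rev.getD (m₁.getD a "") []).foldl (fun ct b => if m₁.contains b then ct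
        else (ct.1.insert b (PySem.Set.discard (ct.1.getD b []) (m₁.getD a "")), PySem.Set.add ct.2 b)) ct) (c, t)).1.getD b [], x ∈ C.getD b [])
    ∧ (∀ b, m₁.contains b = false →
        (W.foldl (fun ct a => (rev.getD (m₁.getD a "") []).foldl (fun ct b => if m₁.contains b then ct
          else (ct.1.insert b (PySem.Set.discard (ct.1.getD b []) (m₁.getD a "")), PySem.Set.add ct.2 b)) ct) (c, t)).1.getD b []
          = (c.getD b []).filter (fun x => !((W.map (fun a => m₁.getD a "")).contains x)))
    ∧ (∀ b, b ∈ (W.foldl (fun ct a => (rev.getD (m₁.getD a "") []).foldl (fun ct b => if m₁.contains b then ct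
        else (ct.1.insert b (PySem.Set.discard (ct.1.getD b []) (m₁.getD a "")), PySem.Set.add ct.2 b)) ct) (c, t)).2
        ↔ b ∈ t ∨ (m₁.contains b = false ∧ ∃ a ∈ W, b ∈ rev.getD (m₁.getD a "") []))
    ∧ (t.Nodup → (W.foldl (fun ct a => (rev.getD (m₁.getD a "") []).foldl (fun ct b => if m₁.contains b then ct
        else (ct.1.insert b (PySem.Set.discard (ct.1.getD b []) (m₁.getD a "")), PySem.Set.add ct.2 b)) ct) (c, t)).2.Nodup)) := by
  induction W with
  | nil =>
    intro c t hk hsub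
    refine ⟨hk, hsub, fun b _ => ?_, by simp, fun h => h⟩
    simp only [List.foldl, List.map_nil]
    exact (List.filter_eq_self.mpr (by intro x hx; rfl)).symm
  | cons a0 W' ih =>
    intro c t hk hsub
    simp only [List.foldl]
    have hLsub : ∀ b ∈ rev.getD (m₁.getD a0 "") [], b ∈ c.keys := by
      intro b hb; rw [hk]; exact ((Hrev _ b).mp hb).1
    have hinner : (rev.getD (m₁.getD a0 "") []).foldl (fun ct b => if m₁.contains b then ct
        else (ct.1.insert b (PySem.Set.discard (ct.1.getD b []) (m₁.getD a0 "")), PySem.Set.add ct.2 b)) (c, t)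
        = ((rev.getD (m₁.getD a0 "") []).foldl (fun ct b => if m₁.contains b then ct
        else (ct.1.insert b (PySem.Set.discard (ct.1.getD b []) (m₁.getD a0 "")), PySem.Set.add ct.2 b)) (c, t)) := rfl
    set v0 := m₁.getD a0 "" with hv0
    set c1t1 := (rev.getD v0 []).foldl (fun ct b => if m₁.contains b then ct
        else (ct.1.insert b (PySem.Set.discard (ct.1.getD b []) v0), PySem.Set.add ct.2 b)) (c, t) with hc1t1
    have hk1 : c1t1.1.keys = C.keys := by
      rw [hc1t1, pv_ct_inner_keys m₁ v0 _ c t hLsub]; exact hk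
    have hgd1 : ∀ b, c1t1.1.getD b [] = if b ∈ rev.getD v0 [] ∧ m₁.contains b = false
        then PySem.Set.discard (c.getD b []) v0 else c.getD b [] := by
      intro b; rw [hc1t1]; exact pv_ct_inner_getD m₁ v0 _ (HrevN v0) c t b
    have hsub1 : ∀ b, m₁.contains b = false → ∀ x ∈ c1t1.1.getD b [], x ∈ C.getD b [] := by
      intro b hb x hx
      rw [hgd1 b] at hx
      split at hx
      · exact hsub b hb x (List.mem_of_mem_filter hx)
      · exact hsub b hb x hx
    obtain ⟨gk, gsub, ggd, gt, gn⟩ := ih c1t1.1 c1t1.2 hk1 hsub1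
    refine ⟨gk, gsub, ?_, ?_, ?_⟩
    · intro b hb
      rw [ggd b hb]
      rw [hgd1 b]
      by_cases hbL : b ∈ rev.getD v0 []
      · rw [if_pos ⟨hbL, hb⟩]
        show ((c.getD b []).filter (fun y => y != v0)).filter _ = _
        rw [List.filter_filter]
        refine List.filter_congr (fun x hx => ?_)
        simp only [List.map_cons, List.contains_cons]
        rw [Bool.not_or, Bool.and_comm]
        rfl
      · rw [if_neg (fun h => hbL h.1)]
        refine List.filter_congr (fun x hx => ?_)
        have hxv : x ≠ v0 := by
          intro hxv
          by_cases hbC : b ∈ C.keys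
          · exact hbL (hxv ▸ (Hrev x b).mpr ⟨hbC, hsub b hb x hx⟩)
          · have hnil : c.getD b [] = [] := by
              refine PySem.Dict.getD_of_not_contains c ([] : List String) ?_
              exact pv_contains_false_of_not_mem_keys c b (by rw [hk]; exact hbC)
            rw [hnil] at hx; cases hx
        simp only [List.map_cons, List.contains_cons]
        rw [Bool.not_or]
        have : (x == v0) = false := by simpa using hxv
        rw [this]
        simp
    · intro b
      rw [gt b, hc1t1, pv_ct_inner_touched m₁ v0 _ c t b]
      constructor
      · rintro ((h | ⟨hb, hf⟩) | ⟨hf, a, ha, hmem⟩)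
        · exact Or.inl h
        · exact Or.inr ⟨hf, a0, List.mem_cons_self, hb⟩
        · exact Or.inr ⟨hf, a, List.mem_cons_of_mem _ ha, hmem⟩
      · rintro (h | ⟨hf, a, ha, hmem⟩)
        · exact Or.inl (Or.inl h)
        · rcases List.mem_cons.mp ha with h' | h'
          · subst h'; exact Or.inl (Or.inr ⟨hmem, hf⟩)
          · exact Or.inr ⟨hf, a, h', hmem⟩
    · intro ht
      exact gn (by rw [hc1t1]; exact pv_ct_inner_tnodup m₁ v0 _ c t ht)

-- the bisimulation invariant between A's state (p, m) and B's state (cand, m, wave)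

def pvUnres (C : PySem.Dict String (List String)) (m : PySem.Dict String String) : List String :=
  C.keys.filter (fun a => !(m.contains a))

def pvInv (C p : PySem.Dict String (List String)) (m : PySem.Dict String String)
    (cand : PySem.Dict String (List String)) (wave : List String) : Prop :=
  m.keys.Nodup ∧
  cand.keys = C.keys ∧
  p.items = (pvUnres C m).map (fun a => (a, cand.getD a [])) ∧
  (∀ a ∈ C.keys, m.contains a = false →
     cand.getD a [] = (C.getD a []).filter (fun x => !(m.values.contains x))) ∧
  wave = (pvUnres C m).filter (fun a => (cand.getD a []).length == 1)

theorem pvBloop_nil (rev : PySem.Dict String (List String)) (occ : PySem.Dict String Int)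
    (fuel : Nat) (cand : PySem.Dict String (List String)) (m : PySem.Dict String String) :
    pvBloop rev occ fuel cand m [] = m := by
  cases fuel <;> simp [pvBloop]

theorem pv_Hrev (C : PySem.Dict String (List String)) (hC : C.keys.Nodup) (v x : String) :
    x ∈ (pvBrev C.items).getD v [] ↔ x ∈ C.keys ∧ v ∈ C.getD x [] := by
  unfold pvBrev
  rw [pv_rev_mem C.items PySem.Dict.empty v x]
  simp only [PySem.Dict.getD_empty, List.not_mem_nil, false_or]
  constructor
  · rintro ⟨q, hq, hx, hv⟩
    have h1 : x ∈ C.keys := by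
      subst hx; exact PySem.Dict.mem_keys_of_mem_items C hq
    have h2 : C.getD q.1 [] = q.2 := PySem.Dict.getD_of_mem_items C (by simpa using hq) hC []
    subst hx
    exact ⟨h1, by rw [h2]; exact hv⟩
  · rintro ⟨hx, hv⟩
    refine ⟨(x, C.getD x []), ?_, rfl, hv⟩
    rw [PySem.Dict.items_eq_map_keys C hC []]
    exact List.mem_map_of_mem hx

theorem pv_HrevN (C : PySem.Dict String (List String)) (v : String) :
    ((pvBrev C.items).getD v []).Nodup := by
  unfold pvBrev
  exact pv_rev_nodup C.items PySem.Dict.empty (fun w => by simp [PySem.Dict.getD_empty]) v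

theorem pvAloop_cons (fuel : Nat) (p : PySem.Dict String (List String))
    (m : PySem.Dict String String) (hp : p.items ≠ []) :
    pvAloop (fuel + 1) p m
      = pvAloop fuel (PySem.Dict.mk (p.items.filterMap (fun q =>
          if (p.items.foldl (fun mm q => if q.2.length == 1 then mm.insert q.1 (q.2.headD "") else mm) m).contains q.1 then none
          else some (q.1, q.2.filter (fun pi => !((p.items.foldl (fun mm q => if q.2.length == 1 then mm.insert q.1 (q.2.headD "") else mm) m).values.contains pi))))))
          (p.items.foldl (fun mm q => if q.2.length == 1 then mm.insert q.1 (q.2.headD "") else mm) m) := by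
  conv_lhs => rw [pvAloop]
  rw [if_neg hp]

theorem pvBloop_cons (rev : PySem.Dict String (List String)) (occ : PySem.Dict String Int)
    (fuel : Nat) (cand : PySem.Dict String (List String)) (m : PySem.Dict String String)
    (wave : List String) (hw : wave ≠ []) :
    pvBloop rev occ (fuel + 1) cand m wave
      = pvBloop rev occ fuel
          (wave.foldl (fun ct a =>
            (rev.getD ((wave.foldl (fun mm a => mm.insert a ((cand.getD a []).headD "")) m).getD a "") []).foldl
              (fun ct b => if (wave.foldl (fun mm a => mm.insert a ((cand.getD a []).headD "")) m).contains b then ct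
                else (ct.1.insert b (PySem.Set.discard (ct.1.getD b [])
                        ((wave.foldl (fun mm a => mm.insert a ((cand.getD a []).headD "")) m).getD a "")),
                      PySem.Set.add ct.2 b)) ct) (cand, ([] : List String))).1
          (wave.foldl (fun mm a => mm.insert a ((cand.getD a []).headD "")) m)
          (PySem.List.sorted
            ((wave.foldl (fun ct a =>
              (rev.getD ((wave.foldl (fun mm a => mm.insert a ((cand.getD a []).headD "")) m).getD a "") []).foldl
                (fun ct b => if (wave.foldl (fun mm a => mm.insert a ((cand.getD a []).headD "")) m).contains b then ct
                  else (ct.1.insert b (PySem.Set.discard (ct.1.getD b [])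
                          ((wave.foldl (fun mm a => mm.insert a ((cand.getD a []).headD "")) m).getD a "")),
                        PySem.Set.add ct.2 b)) ct) (cand, ([] : List String))).2.filter
              (fun b => ((wave.foldl (fun ct a =>
                (rev.getD ((wave.foldl (fun mm a => mm.insert a ((cand.getD a []).headD "")) m).getD a "") []).foldl
                  (fun ct b => if (wave.foldl (fun mm a => mm.insert a ((cand.getD a []).headD "")) m).contains b then ct
                    else (ct.1.insert b (PySem.Set.discard (ct.1.getD b [])
                            ((wave.foldl (fun mm a => mm.insert a ((cand.getD a []).headD "")) m).getD a "")),
                          PySem.Set.add ct.2 b)) ct) (cand, ([] : List String))).1.getD b []).length == 1))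
            (fun b => occ.getD b 0) false) := by
  conv_lhs => rw [pvBloop]
  rw [if_neg hw]

theorem pv_loop_eq (C : PySem.Dict String (List String)) (hC : C.keys.Nodup) (fuel : Nat) :
    ∀ (p : PySem.Dict String (List String)) (m : PySem.Dict String String)
      (cand : PySem.Dict String (List String)) (wave : List String),
      pvInv C p m cand wave →
      pvAloop fuel p m = pvBloop (pvBrev C.items) (pvBocc C.keys) fuel cand m wave := by
  induction fuel with
  | zero => intro p m cand wave _; rfl
  | succ fuel ih =>
    intro p m cand wave hInv
    obtain ⟨hmnd, hck, hpi, hcd, hwv⟩ := hInv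
    have hwsub : ∀ a ∈ wave, a ∈ C.keys ∧ m.contains a = false ∧ ((cand.getD a []).length == 1) = true := by
      intro a ha
      rw [hwv] at ha
      have h1 := List.of_mem_filter ha
      have h2 := List.mem_of_mem_filter ha
      have h3 := List.of_mem_filter h2
      have h4 := List.mem_of_mem_filter h2
      exact ⟨h4, by simpa using h3, h1⟩
    by_cases hw : wave = []
    · subst hw
      rw [pvBloop_nil]
      -- A's round is a no-op: no singleton sets, nothing newly mapped, values already filtered
      have hnosing : ∀ q ∈ p.items, (q.2.length == 1) = false := by
        intro q hq
        rw [hpi] at hq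
        obtain ⟨a, ha, rfl⟩ := List.mem_map.mp hq
        have ha1 : a ∈ C.keys := List.mem_of_mem_filter ha
        have ha2 : m.contains a = false := by simpa using List.of_mem_filter ha
        by_contra hne
        have : a ∈ (pvUnres C m).filter (fun a => (cand.getD a []).length == 1) := by
          refine List.mem_filter.mpr ⟨ha, ?_⟩
          simpa using hne
        rw [← hwv] at this
        cases this
      by_cases hp : p.items = []
      · simp [pvAloop, hp]
      · have hstep : pvAloop (fuel + 1) p m = pvAloop fuel (PySem.Dict.mk (p.items.filterMap (fun q =>
            if (p.items.foldl (fun mm q => if q.2.length == 1 then mm.insert q.1 (q.2.headD "") else mm) m).contains q.1 then none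
            else some (q.1, q.2.filter (fun pi => !((p.items.foldl (fun mm q => if q.2.length == 1 then mm.insert q.1 (q.2.headD "") else mm) m).values.contains pi))))))
            (p.items.foldl (fun mm q => if q.2.length == 1 then mm.insert q.1 (q.2.headD "") else mm) m) := by
          conv_lhs => rw [pvAloop]
          rw [if_neg hp]
        have hmm : p.items.foldl (fun mm q => if q.2.length == 1 then mm.insert q.1 (q.2.headD "") else mm) m = m :=
          pv_foldl_guard_false p.items (fun q => q.2.length == 1) (fun mm q => mm.insert q.1 (q.2.headD "")) m hnosing
        rw [hstep, hmm]
        have hpp : p.items.filterMap (fun q =>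
            if m.contains q.1 then none
            else some (q.1, q.2.filter (fun pi => !(m.values.contains pi)))) = p.items := by
          have : ∀ q ∈ p.items, (if m.contains q.1 then none
              else some (q.1, q.2.filter (fun pi => !(m.values.contains pi)))) = some q := by
            intro q hq
            rw [hpi] at hq
            obtain ⟨a, ha, rfl⟩ := List.mem_map.mp hq
            have ha1 : a ∈ C.keys := List.mem_of_mem_filter ha
            have ha2 : m.contains a = false := by simpa using List.of_mem_filter ha
            rw [ha2]
            simp only [Bool.false_eq_true, if_false, Option.some.injEq]
            refine Prod.ext rfl ?_
            show ((cand.getD a []).filter _) = cand.getD a []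
            rw [hcd a ha1 ha2]
            rw [List.filter_filter]
            refine List.filter_congr (fun x hx => ?_)
            simp
          rw [List.filterMap_congr this]
          exact List.filterMap_some
        rw [hpp]
        have : PySem.Dict.mk p.items = p := by
          apply PySem.Dict.ext; rfl
        rw [this]
        rw [ih p m cand [] ⟨hmnd, hck, hpi, hcd, hwv⟩]
        exact pvBloop_nil _ _ _ _ _
    · -- a real wave: both sides resolve exactly the allergens in `wave`
      have hndU : (pvUnres C m).Nodup := hC.filter _
      have hndw : wave.Nodup := by rw [hwv]; exact hndU.filter _
      have hfresh : ∀ a ∈ wave, m.contains a = false := fun a ha => (hwsub a ha).2.1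
      have hp : p.items ≠ [] := by
        obtain ⟨a, ha⟩ := List.exists_mem_of_ne_nil wave hw
        have haU : a ∈ pvUnres C m := by rw [hwv] at ha; exact List.mem_of_mem_filter ha
        rw [hpi]
        simp only [ne_eq, List.map_eq_nil_iff]
        intro hUe
        rw [hUe] at haU
        cases haU
      rw [pvAloop_cons fuel p m hp, pvBloop_cons _ _ fuel cand m wave hw]
      have hmA : p.items.foldl (fun mm q => if q.2.length == 1 then mm.insert q.1 (q.2.headD "") else mm) m
          = wave.foldl (fun mm a => mm.insert a ((cand.getD a []).headD "")) m := by
        rw [hpi, List.foldl_map, hwv, List.foldl_filter]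
      rw [hmA]
      set M := wave.foldl (fun mm a => mm.insert a ((cand.getD a []).headD "")) m with hMdef
      have hMnd : M.keys.Nodup := pv_keys_nodup_waveFold wave _ m hfresh hndw hmnd
      have hMcont : ∀ x, M.contains x = (m.contains x || wave.contains x) :=
        pv_contains_waveFold wave _ m hfresh hndw
      have hMvals : M.values = m.values ++ wave.map (fun a => (cand.getD a []).headD "") :=
        pv_values_waveFold wave _ m hfresh hndw
      have hMgetD : ∀ a ∈ wave, M.getD a "" = (cand.getD a []).headD "" :=
        fun a ha => pv_getD_waveFold_mem wave _ m a hfresh hndw hmnd ha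
      have hMimp : ∀ a, M.contains a = false → m.contains a = false := by
        intro a hMa
        have h := hMcont a
        rw [hMa] at h
        cases hma : m.contains a
        · rfl
        · rw [hma] at h; simp at h
      have hMwave : ∀ a ∈ wave, M.contains a = true := by
        intro a ha
        rw [hMcont a, List.contains_iff_mem.mpr ha]
        simp
      have hmapf : wave.map (fun a => M.getD a "") = wave.map (fun a => (cand.getD a []).headD "") :=
        List.map_congr_left (fun a ha => hMgetD a ha)
      have hsubX : ∀ b, M.contains b = false → ∀ x ∈ cand.getD b [], x ∈ C.getD b [] := by
        intro b hMb x hx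
        by_cases hbC : b ∈ C.keys
        · rw [hcd b hbC (hMimp b hMb)] at hx
          exact List.mem_of_mem_filter hx
        · have hnil : cand.getD b [] = [] :=
            PySem.Dict.getD_of_not_contains cand ([] : List String)
              (pv_contains_false_of_not_mem_keys cand b (by rw [hck]; exact hbC))
          rw [hnil] at hx; cases hx
      obtain ⟨gk, gsub, ggd, gt, gn⟩ :=
        pv_ct_outer C (pvBrev C.items) M (pv_Hrev C hC) (pv_HrevN C) wave cand [] hck hsubX
      set CT := wave.foldl (fun ct a =>
          ((pvBrev C.items).getD (M.getD a "") []).foldl (fun ct b => if M.contains b then ct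
            else (ct.1.insert b (PySem.Set.discard (ct.1.getD b []) (M.getD a "")), PySem.Set.add ct.2 b)) ct)
          (cand, ([] : List String)) with hCTdef
      set wave' := (pvUnres C M).filter (fun a => (CT.1.getD a []).length == 1) with hwv'
      have hsorted : PySem.List.sorted (CT.2.filter (fun b => (CT.1.getD b []).length == 1))
          (fun b => (pvBocc C.keys).getD b 0) false = wave' := by
        refine PySem.List.sorted_eq_of_perm_of_pairwise_lt _ _ _ ?_ ?_
        · refine (List.perm_ext_iff_of_nodup ((hC.filter _).filter _) ((gn List.nodup_nil).filter _)).mpr ?_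
          intro b
          constructor
          · intro hbT
            have h1 := List.mem_of_mem_filter hbT
            have hlen := List.of_mem_filter hbT
            have hbC : b ∈ C.keys := List.mem_of_mem_filter h1
            have hMb : M.contains b = false := by simpa using List.of_mem_filter h1
            have hmb : m.contains b = false := hMimp b hMb
            refine List.mem_filter.mpr ⟨?_, hlen⟩
            rw [gt b]
            refine Or.inr ⟨hMb, ?_⟩
            by_contra hno
            push Not at hno
            have hid : CT.1.getD b [] = cand.getD b [] := by
              rw [ggd b hMb]
              refine List.filter_eq_self.mpr (fun x hx => ?_)
              have hxnot : x ∉ wave.map (fun a => M.getD a "") := by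
                intro hxm
                obtain ⟨a, ha, hxa⟩ := List.mem_map.mp hxm
                refine hno a ha ?_
                rw [hxa] at *
                exact (pv_Hrev C hC _ b).mpr ⟨hbC, hsubX b hMb _ hx⟩
              simpa using hxnot
            have hbw : b ∈ wave := by
              rw [hwv]
              refine List.mem_filter.mpr ⟨List.mem_filter.mpr ⟨hbC, by simp [hmb]⟩, ?_⟩
              rw [← hid]
              exact hlen
            rw [hMwave b hbw] at hMb
            cases hMb
          · intro hbx
            have hlen := List.of_mem_filter hbx
            have hbt := List.mem_of_mem_filter hbx
            rw [gt b] at hbt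
            rcases hbt with h | ⟨hMb, a, ha, hmem⟩
            · cases h
            have hbC : b ∈ C.keys := ((pv_Hrev C hC _ b).mp hmem).1
            exact List.mem_filter.mpr ⟨List.mem_filter.mpr ⟨hbC, by simp [hMb]⟩, hlen⟩
        · exact (pv_occ_pairwise C.keys hC).sublist (List.filter_sublist.trans List.filter_sublist)
      have hK2' : (PySem.Dict.mk (p.items.filterMap (fun q =>
          if M.contains q.1 then none
          else some (q.1, q.2.filter (fun pi => !(M.values.contains pi)))))).items
          = (pvUnres C M).map (fun a => (a, CT.1.getD a [])) := by
        show p.items.filterMap _ = _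
        rw [hpi, List.filterMap_map]
        have hcongr : ∀ a ∈ pvUnres C m,
            ((fun q => if M.contains q.1 then none
               else some (q.1, q.2.filter (fun pi => !(M.values.contains pi))))
              ∘ (fun a => (a, cand.getD a []))) a
            = (fun a => if M.contains a then none else some (a, CT.1.getD a [])) a := by
          intro a ha
          simp only [Function.comp]
          by_cases hMa : M.contains a = true
          · rw [if_pos hMa, if_pos hMa]
          · have hMa' : M.contains a = false := by simpa using hMa
            rw [if_neg (by simp [hMa']), if_neg (by simp [hMa'])]
            have haC : a ∈ C.keys := List.mem_of_mem_filter ha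
            have hma : m.contains a = false := hMimp a hMa'
            have hval : (cand.getD a []).filter (fun pi => !(M.values.contains pi)) = CT.1.getD a [] := by
              rw [ggd a hMa', hmapf]
              refine List.filter_congr (fun x hx => ?_)
              have hxm : m.values.contains x = false := by
                have hcda := hcd a haC hma
                rw [hcda] at hx
                simpa using List.of_mem_filter hx
              rw [hMvals, List.contains_append, hxm]
              simp
            rw [hval]
        rw [List.filterMap_congr hcongr, pv_filterMap_ite]
        congr 1
        show (C.keys.filter _).filter _ = C.keys.filter _
        rw [List.filter_filter]
        refine List.filter_congr (fun a _ => ?_)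
        cases hma : m.contains a
        · simp
        · have hMa : M.contains a = true := by rw [hMcont a, hma]; rfl
          simp [hMa]
      have hK3' : ∀ a ∈ C.keys, M.contains a = false →
          CT.1.getD a [] = (C.getD a []).filter (fun x => !(M.values.contains x)) := by
        intro a haC hMa
        rw [ggd a hMa, hmapf, hcd a haC (hMimp a hMa), List.filter_filter]
        refine List.filter_congr (fun x _ => ?_)
        rw [hMvals, List.contains_append, Bool.not_or]
        exact Bool.and_comm _ _
      rw [hsorted]
      exact ih _ M CT.1 wave' ⟨hMnd, gk, hK2', hK3', hwv'⟩

theorem pv_main (food : List (List String × List String)) :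
    get_allergen_to_ingredient_mapping food = get_allergen_to_ingredient_mapping_alt food := by
  have hC : (pvBbuild food).keys.Nodup := pv_build_keys_nodup food
  have hU : pvUnres (pvBbuild food) PySem.Dict.empty = (pvBbuild food).keys := by
    unfold pvUnres
    refine List.filter_eq_self.mpr (fun a _ => ?_)
    simp [PySem.Dict.contains_empty]
  have hInv0 : pvInv (pvBbuild food) (pvBbuild food) PySem.Dict.empty (pvBbuild food)
      (((pvBbuild food).items.filter (fun q => q.2.length == 1)).map (fun x => x.1)) := by
    refine ⟨by simp, rfl, ?_, ?_, ?_⟩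
    · rw [hU]
      exact PySem.Dict.items_eq_map_keys _ hC []
    · intro a _ _
      refine (List.filter_eq_self.mpr (fun x _ => ?_)).symm
      rfl
    · rw [hU]
      rw [PySem.Dict.items_eq_map_keys _ hC [], List.filter_map]
      simp only [Function.comp_def, List.map_map]
      simp
  have h := pv_loop_eq (pvBbuild food) hC ((pvBbuild food).size + 1) (pvBbuild food)
    PySem.Dict.empty (pvBbuild food)
    (((pvBbuild food).items.filter (fun q => q.2.length == 1)).map (fun x => x.1)) hInv0
  show (pvAloop ((pvAbuild food).size + 1) (pvAbuild food) PySem.Dict.empty).items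
      = (pvBloop (pvBrev (pvBbuild food).items) (pvBocc ((pvBbuild food).items.map (fun x => x.1)))
          ((pvBbuild food).size + 1) (pvBbuild food) PySem.Dict.empty
          (((pvBbuild food).items.filter (fun q => q.2.length == 1)).map (fun x => x.1))).items
  rw [pv_build_eq food]
  rw [show ((pvBbuild food).items.map (fun x => x.1)) = (pvBbuild food).keys from rfl]
  rw [h]

-- ===== VERDICT (by name: the statement is the Claim_ definition above) =====
theorem get_allergen_to_ingredient_mapping_spec : Claim_equal_get_allergen_to_ingredient_mapping := by
  intro food _
  unfold Spec_get_allergen_to_ingredient_mapping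
  exact pv_main food
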